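-- pv_equiv track=rewrite | github.com/luunpl/University | Semestre 1/101_INF/Annales/Partiel_2022.py | fecondite
-- ===== SOURCE A (Python) =====
-- def zero(n):
--     for chiffre in str(n):
--         if chiffre == "0":
--             return True
--     return False
--
-- def prod(n):
--     produit = 1
--     for chiffre in str(n):
--         produit *= int(chiffre)
--     return produit
--
-- def fecondite(n):
--     fecondite = 0
--     terme = n
--     produit = prod(terme)
--     while not zero(produit):
--         produit += prod(produit)
--         fecondite += 1
--     return fecondite
-- ===== SOURCE B (Python) =====
-- def fecondite(n):
--     # Fully recursive decomposition: digit product by structural recursion on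
--     # the decimal string, step count by top-down recursion 1 + steps(...).
--     def dp(s):
--         return 1 if s == "" else int(s[0]) * dp(s[1:])
--     def steps(p):
--         return 0 if "0" in str(p) else 1 + steps(p + dp(str(p)))
--     return steps(dp(str(n)))
-- ===== Notes on version B (the rewrite author's own statement) =====
-- stated objective: alternative
-- what changed: B replaces A's imperative while-loop with two helper scans by a fully recursive decomposition: the digit product is computed by structural recursion on the decimal string and the step count by top-down recursion, with the zero-digit test as a substring membership instead of a character scan.
import Mathlib
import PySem

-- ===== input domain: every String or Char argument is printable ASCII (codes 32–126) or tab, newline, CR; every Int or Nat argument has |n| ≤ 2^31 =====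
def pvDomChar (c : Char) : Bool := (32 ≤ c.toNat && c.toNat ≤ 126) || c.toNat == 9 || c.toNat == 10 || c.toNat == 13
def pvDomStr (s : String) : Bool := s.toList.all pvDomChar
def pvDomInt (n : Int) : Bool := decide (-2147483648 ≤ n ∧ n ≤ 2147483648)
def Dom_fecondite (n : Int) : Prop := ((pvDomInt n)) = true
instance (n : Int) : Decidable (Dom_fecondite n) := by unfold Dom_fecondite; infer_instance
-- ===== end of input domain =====

-- B replaces A's imperative while-loop and its two helper scans by a fully recursive
-- decomposition (digit product by structural recursion on the string, step count by
-- top-down recursion); return value only.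

-- ===== PORT A =====
-- zero(n): scan str(n) for the character '0'
def zeroA (n : Int) : Bool := (PySem.Int.toChars n).any (fun c => c == '0')

-- prod(n): produit = 1; for chiffre in str(n): produit *= int(chiffre)
-- int('-') raises ValueError (PySem.Int.ofChars? = none), so the fold carries an Option.
def prodA (n : Int) : Option Int :=
  (PySem.Int.toChars n).foldl
    (fun acc c => acc.bind (fun a => (PySem.Int.ofChars? [c]).map (fun d => a * d)))
    (some 1)

-- the while loop of fecondite; the fuel only makes the recursion total — on the whole
-- domain |n| ≤ 2^31 the Python loop runs at most 26 iterations, far below 1000.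
def loopA (fuel : Nat) (produit : Int) (fec : Int) : Int :=
  match fuel with
  | 0 => fec
  | fuel + 1 =>
    if zeroA produit then fec
    else
      match prodA produit with
      | none => fec          -- ValueError path, unreachable under Pre_
      | some q => loopA fuel (produit + q) (fec + 1)

def fecondite (n : Int) : Int :=
  match prodA n with
  | none => 0                -- ValueError path, unreachable under Pre_
  | some p => loopA 1000 p 0

-- ===== PORT B =====
-- dp(s): 1 if s == "" else int(s[0]) * dp(s[1:]) — structural recursion on the chars;
-- int('-') raises ValueError (ofChars? = none), carried by the Option.
def dpChars : List Char → Option Int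
  | [] => some 1
  | c :: s => (PySem.Int.ofChars? [c]).bind (fun d => (dpChars s).map (fun p => d * p))

-- steps(p): 0 if "0" in str(p) else 1 + steps(p + dp(str(p)));
-- the fuel only makes the Python recursion total (depth ≤ 26 on the domain, far below 1000).
def stepsB (fuel : Nat) (p : Int) : Int :=
  match fuel with
  | 0 => 0
  | fuel + 1 =>
    if PySem.Chars.isIn ['0'] (PySem.Int.toChars p) then 0
    else
      match dpChars (PySem.Int.toChars p) with
      | none => 0            -- ValueError path, unreachable under Pre_
      | some q => 1 + stepsB fuel (p + q)

def fecondite_alt (n : Int) : Int :=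
  match dpChars (PySem.Int.toChars n) with
  | none => 0                -- ValueError path, unreachable under Pre_
  | some p => stepsB 1000 p

-- ===== PRECONDITION & SPEC =====
-- Pre_ excludes negative n: there str(n) starts with '-' and int('-') raises ValueError in A's prod.
def Pre_fecondite (n : Int) : Prop := 0 ≤ n
instance (n : Int) : Decidable (Pre_fecondite n) := by unfold Pre_fecondite; infer_instance
def pvWitness_fecondite : Int := 7

def Spec_fecondite (n : Int) (out : Int) : Prop := out = fecondite_alt n
instance (n : Int) (out : Int) : Decidable (Spec_fecondite n out) := by unfold Spec_fecondite; infer_instance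

-- ===== CLAIM (what is proved, stated in full; the proofs are below) =====
def Claim_equal_fecondite : Prop := ∀ (n : Int), Dom_fecondite n → Pre_fecondite n → Spec_fecondite n (fecondite n)

-- ===== LEMMAS AND PROOFS =====

theorem toDigitsCore_eq (f : Nat) : ∀ (m : Nat) (acc : List Char), 0 < m → m ≤ f →
    Nat.toDigitsCore 10 f m acc = ((Nat.digits 10 m).reverse.map Nat.digitChar) ++ acc := by
  induction f with
  | zero => intro m acc hm hf; omega
  | succ f ih =>
    intro m acc hm hf
    simp only [Nat.toDigitsCore]
    rw [Nat.digits_def' (by norm_num) hm]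
    by_cases h : m / 10 = 0
    · simp [h]
    · rw [if_neg h, ih (m / 10) _ (Nat.pos_of_ne_zero h) (by omega)]
      simp

theorem toDigits_eq (m : Nat) (hm : 0 < m) :
    Nat.toDigits 10 m = (Nat.digits 10 m).reverse.map Nat.digitChar := by
  rw [Nat.toDigits, toDigitsCore_eq (m+1) m [] hm (by omega)]; simp

theorem toChars_nonneg (m : Nat) : PySem.Int.toChars (m : Int) = Nat.toDigits 10 m := by
  simp [PySem.Int.toChars]

theorem ofChars_digitChar (d : Nat) (hd : d < 10) :
    PySem.Int.ofChars? [Nat.digitChar d] = some (d : Int) := by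
  interval_cases d <;> rfl

theorem digitChar_eq_zero (d : Nat) (hd : d < 10) : (Nat.digitChar d == '0') = (d == 0) := by
  interval_cases d <;> rfl

-- the digit product as one Int-valued function of a natural number
def dprod (m : Nat) : Int := if m = 0 then 0 else ((Nat.digits 10 m).prod : Int)

theorem dprod_nonneg (m : Nat) : 0 ≤ dprod m := by
  unfold dprod; split_ifs with h
  · simp
  · positivity

-- A's left fold over the digit characters computes the digit product
theorem fold_prod (ds : List Nat) (h : ∀ d ∈ ds, d < 10) : ∀ (a : Int),
    (ds.map Nat.digitChar).foldl
      (fun acc c => acc.bind (fun a => (PySem.Int.ofChars? [c]).map (fun d => a * d)))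
      (some a) = some (a * (ds.prod : Int)) := by
  induction ds with
  | nil => intro a; simp
  | cons d ds ih =>
    intro a
    simp only [List.map_cons, List.foldl_cons, Option.bind_some,
      ofChars_digitChar d (h d (by simp)), Option.map_some]
    rw [ih (fun x hx => h x (by simp [hx])) (a * d)]
    congr 1
    simp only [List.prod_cons]
    push_cast
    ring

-- B's right recursion over the digit characters computes the digit product
theorem dpChars_map (ds : List Nat) (h : ∀ d ∈ ds, d < 10) :
    dpChars (ds.map Nat.digitChar) = some ((ds.prod : Int)) := by
  induction ds with
  | nil => rfl
  | cons d ds ih =>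
    simp only [List.map_cons, dpChars, ofChars_digitChar d (h d (by simp)),
      Option.bind_some, ih (fun x hx => h x (by simp [hx])), Option.map_some,
      List.prod_cons, Option.some.injEq]
    push_cast
    ring

theorem digits_lt (m : Nat) : ∀ d ∈ Nat.digits 10 m, d < 10 :=
  fun d hd => Nat.digits_lt_base (by norm_num) hd

theorem prodA_eq (m : Nat) : prodA (m : Int) = some (dprod m) := by
  by_cases hm : 0 < m
  · rw [prodA, toChars_nonneg, toDigits_eq m hm, dprod, if_neg (by omega)]
    rw [fold_prod _ (fun d hd => digits_lt m d (by simpa using hd)) 1]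
    simp
  · have : m = 0 := by omega
    subst this; rfl

theorem dpChars_eq (m : Nat) : dpChars (PySem.Int.toChars (m : Int)) = some (dprod m) := by
  by_cases hm : 0 < m
  · rw [toChars_nonneg, toDigits_eq m hm, dprod, if_neg (by omega),
      dpChars_map _ (fun d hd => digits_lt m d (by simpa using hd))]
    simp
  · have : m = 0 := by omega
    subst this; rfl

-- A's character scan for '0' decides whether the digit product vanishes
theorem any_zero (ds : List Nat) (h : ∀ d ∈ ds, d < 10) :
    ((ds.map Nat.digitChar).any (fun c => c == '0')) = ds.any (fun d => d == 0) := by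
  induction ds with
  | nil => rfl
  | cons d ds ih =>
    simp only [List.map_cons, List.any_cons, digitChar_eq_zero d (h d (by simp)),
      ih (fun x hx => h x (by simp [hx]))]

theorem zeroA_eq (m : Nat) : zeroA (m : Int) = decide (dprod m = 0) := by
  by_cases hm : 0 < m
  · rw [zeroA, toChars_nonneg, toDigits_eq m hm, dprod, if_neg (by omega)]
    rw [List.map_reverse, List.any_reverse,
      any_zero _ (fun d hd => digits_lt m d (by simpa using hd))]
    rcases Nat.eq_zero_or_pos (Nat.digits 10 m).prod with hp | hp
    · simp [hp, List.any_eq, List.prod_eq_zero_iff.mp hp]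
    · have h0 : (0 : ℕ) ∉ Nat.digits 10 m := fun hmem => by
        have := List.prod_eq_zero_iff.mpr hmem; omega
      simp only [List.any_eq, decide_eq_decide]
      constructor
      · rintro ⟨x, hx, hx0⟩
        have hx' : x = 0 := by simpa using hx0
        exact absurd (hx' ▸ hx) h0
      · intro hc
        have : (Nat.digits 10 m).prod = 0 := by exact_mod_cast hc
        omega
  · have : m = 0 := by omega
    subst this; rfl

-- B's substring test '"0" in str(p)' agrees with A's character scan
theorem isIn_singleton (l : List Char) :
    PySem.Chars.isIn ['0'] l = l.any (fun c => c == '0') := by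
  rcases h : PySem.Chars.isIn ['0'] l with _ | _
  · have hnin := (PySem.Chars.isIn_eq_false_iff _ _).mp h
    symm
    simp only [List.any_eq_false]
    intro c hc hc0
    have hc' : c = '0' := by simpa using hc0
    subst hc'
    obtain ⟨s, t, hst⟩ := List.mem_iff_append.mp hc
    exact hnin (List.infix_iff_prefix_suffix.mpr ⟨'0' :: t, ⟨t, rfl⟩, ⟨s, by simp [hst]⟩⟩)
  · have := (PySem.Chars.isIn_iff_infix _ _).mp h
    symm
    simp only [List.any_eq_true]
    exact ⟨'0', this.mem (by simp), by simp⟩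

-- the two loops agree: A's accumulator c plus B's top-down count
theorem loop_eq (f : Nat) : ∀ (v c : Int), 0 ≤ v → loopA f v c = c + stepsB f v := by
  induction f with
  | zero => intro v c _; simp [loopA, stepsB]
  | succ f ih =>
    intro v c hv
    obtain ⟨m, rfl⟩ : ∃ m : Nat, v = (m : Int) := ⟨v.toNat, (Int.toNat_of_nonneg hv).symm⟩
    rw [loopA, stepsB, isIn_singleton, ← zeroA, zeroA_eq, prodA_eq, dpChars_eq]
    by_cases hq : dprod m = 0
    · simp [hq]
    · simp only [hq, decide_false, Bool.false_eq_true, if_false]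
      rw [ih _ _ (by have := dprod_nonneg m; omega)]
      ring

theorem main (n : Int) (hn : 0 ≤ n) : fecondite n = fecondite_alt n := by
  obtain ⟨m, rfl⟩ : ∃ m : Nat, n = (m : Int) := ⟨n.toNat, (Int.toNat_of_nonneg hn).symm⟩
  rw [fecondite, fecondite_alt, prodA_eq, dpChars_eq]
  simpa using loop_eq 1000 (dprod m) 0 (dprod_nonneg m)

-- ===== VERDICT (by name: the statement is the Claim_ definition above) =====
theorem fecondite_spec : Claim_equal_fecondite := by
  intro n _ hn
  unfold Spec_fecondite
  exact main n hn
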